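-- pv_equiv track=rewrite | github.com/isayevlab/TSMegaGen | data_processing/process_and_filter_dataset.py | have_common_fragments
-- ===== SOURCE A (Python) =====
-- def have_common_fragments(fragments_r, fragments_p, min_common_atoms=3):
--     """Check if reactants and products have common fragments"""
--     # Convert fragments to sets of (atom_idx, atomic_number) tuples for comparison
--     r_frag_sets = [frozenset(frag) for frag in fragments_r]
--     p_frag_sets = [frozenset(frag) for frag in fragments_p]
--
--     for r_frag in r_frag_sets:
--         for p_frag in p_frag_sets:
--             # Check if fragments have significant overlap
--             common = r_frag & p_frag
--             if len(common) >= min_common_atoms: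
--                 # Check if the common atoms form a connected subgraph
--                 common_atoms = list(common)
--                 if len(common_atoms) >= min_common_atoms:
--                     return True
--     return False
-- ===== SOURCE B (Python) =====
-- def have_common_fragments(fragments_r, fragments_p, min_common_atoms=3):
--     """Check if reactants and products have common fragments (inverted-index version)"""
--     if min_common_atoms <= 0:
--         return bool(fragments_r) and bool(fragments_p)
--     # inverted index: atom -> list of reactant-fragment indices containing it
--     index = {}
--     for i, frag in enumerate(fragments_r):
--         for atom in set(frag):
--             index.setdefault(atom, []).append(i)
--     for frag in fragments_p:
--         counts = {}
--         for atom in set(frag):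
--             for i in index.get(atom, ()):
--                 counts[i] = counts.get(i, 0) + 1
--         if any(c >= min_common_atoms for c in counts.values()):
--             return True
--     return False
-- ===== Notes on version B (the rewrite author's own statement) =====
-- stated objective: faster
-- what changed: Replaces A's pairwise frozenset intersections over all reactant-product fragment pairs with an inverted index from atom to reactant-fragment indices, then a single counting pass per product fragment (with early exit on the first qualifying fragment).
import Mathlib
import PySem

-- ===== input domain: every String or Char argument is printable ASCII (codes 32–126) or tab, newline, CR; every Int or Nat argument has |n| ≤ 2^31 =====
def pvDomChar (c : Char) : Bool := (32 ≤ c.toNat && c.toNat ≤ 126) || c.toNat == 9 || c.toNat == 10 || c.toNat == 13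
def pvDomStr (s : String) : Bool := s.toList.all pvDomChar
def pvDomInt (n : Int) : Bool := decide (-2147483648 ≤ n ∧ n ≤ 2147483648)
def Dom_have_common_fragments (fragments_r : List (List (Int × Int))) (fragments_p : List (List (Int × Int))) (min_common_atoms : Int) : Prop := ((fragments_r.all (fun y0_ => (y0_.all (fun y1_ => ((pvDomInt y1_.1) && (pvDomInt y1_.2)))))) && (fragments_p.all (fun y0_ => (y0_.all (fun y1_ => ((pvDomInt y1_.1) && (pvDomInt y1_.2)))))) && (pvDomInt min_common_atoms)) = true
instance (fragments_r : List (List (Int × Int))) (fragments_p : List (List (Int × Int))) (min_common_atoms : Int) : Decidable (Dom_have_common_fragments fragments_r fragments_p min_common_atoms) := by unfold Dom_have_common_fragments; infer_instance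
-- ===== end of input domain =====

-- B replaces A's pairwise frozenset intersections with an inverted index (atom → reactant-fragment
-- indices) and per-product-fragment overlap counters; measurably faster on large inputs.

-- ===== PORT A =====
-- literal port of A: frozenset(frag) = PySem.Set.ofList frag; the nested loop with early
-- 'return True' is the Bool-valued List.any; 'len(common)' is Set.len; 'list(common)' is the
-- set's element list (only its length is used, so Python's hash order cannot matter).
def have_common_fragments (fragments_r : List (List (Int × Int))) (fragments_p : List (List (Int × Int))) (min_common_atoms : Int) : Bool :=
  let r_frag_sets : List (PySem.Set (Int × Int)) := fragments_r.map (fun frag => PySem.Set.ofList frag)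
  let p_frag_sets : List (PySem.Set (Int × Int)) := fragments_p.map (fun frag => PySem.Set.ofList frag)
  r_frag_sets.any (fun r_frag =>
    p_frag_sets.any (fun p_frag =>
      let common := PySem.Set.inter r_frag p_frag
      if min_common_atoms ≤ PySem.Set.len common then
        let common_atoms : List (Int × Int) := common
        decide (min_common_atoms ≤ (common_atoms.length : Int))
      else false))

-- ===== PORT B =====
-- literal port of Source B: enumerate = PySem.List.enumerate; dict = PySem.Dict;
-- 'index.setdefault(atom, []).append(i)' = insert atom (getD atom [] ++ [i]);
-- 'counts[i] = counts.get(i, 0) + 1' = insert i (getD i 0 + 1).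
def have_common_fragments_alt (fragments_r : List (List (Int × Int))) (fragments_p : List (List (Int × Int))) (min_common_atoms : Int) : Bool :=
  if min_common_atoms ≤ 0 then
    !fragments_r.isEmpty && !fragments_p.isEmpty
  else
    let index : PySem.Dict (Int × Int) (List Int) :=
      (PySem.List.enumerate fragments_r).foldl (fun d p =>
        (PySem.Set.ofList p.2).foldl (fun d atom => d.insert atom (d.getD atom [] ++ [p.1])) d)
        PySem.Dict.empty
    fragments_p.any (fun frag =>
      let counts : PySem.Dict Int Int :=
        (PySem.Set.ofList frag).foldl (fun c atom =>
          (index.getD atom []).foldl (fun c i => c.insert i (c.getD i 0 + 1)) c)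
          PySem.Dict.empty
      counts.values.any (fun c => decide (min_common_atoms ≤ c)))

-- ===== PRECONDITION & SPEC =====
def Spec_have_common_fragments (fragments_r : List (List (Int × Int))) (fragments_p : List (List (Int × Int))) (min_common_atoms : Int) (out : Bool) : Prop := out = have_common_fragments_alt fragments_r fragments_p min_common_atoms
instance (fragments_r : List (List (Int × Int))) (fragments_p : List (List (Int × Int))) (min_common_atoms : Int) (out : Bool) : Decidable (Spec_have_common_fragments fragments_r fragments_p min_common_atoms out) := by unfold Spec_have_common_fragments; infer_instance

-- ===== CLAIM (what is proved, stated in full; the proofs are below) =====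
def Claim_equal_have_common_fragments : Prop := ∀ (fragments_r : List (List (Int × Int))) (fragments_p : List (List (Int × Int))) (min_common_atoms : Int), Dom_have_common_fragments fragments_r fragments_p min_common_atoms → Spec_have_common_fragments fragments_r fragments_p min_common_atoms (have_common_fragments fragments_r fragments_p min_common_atoms)

-- ===== LEMMAS AND PROOFS =====

-- the index lists B builds, in specification form
def pvIdx (fragments_r : List (List (Int × Int))) (atom : Int × Int) : List Int :=
  ((PySem.List.enumerate fragments_r).filter (fun p => decide (atom ∈ p.2))).map Prod.fst

-- one fragment's contribution to the index
theorem pvIdx_inner (s : List (Int × Int)) (hs : s.Nodup) (d : PySem.Dict (Int × Int) (List Int))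
    (i : Int) (atom : Int × Int) :
    (s.foldl (fun d a => d.insert a (d.getD a [] ++ [i])) d).getD atom []
      = d.getD atom [] ++ (if atom ∈ s then [i] else []) := by
  induction s generalizing d with
  | nil => simp
  | cons a rest ih =>
    simp only [List.foldl_cons]
    rcases List.nodup_cons.mp hs with ⟨ha, hrest⟩
    by_cases h : atom = a
    · subst h
      rw [ih hrest, if_neg ha, PySem.Dict.getD_insert_self]
      simp
    · rw [ih hrest, PySem.Dict.getD_insert_of_ne _ _ _ h]
      simp [List.mem_cons, h]

-- the whole index: its list for 'atom' is the (increasing) list of indices of fragments containing atom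
theorem pvIdx_spec (l : List (Int × List (Int × Int))) (d : PySem.Dict (Int × Int) (List Int))
    (atom : Int × Int) :
    (l.foldl (fun d p =>
        (PySem.Set.ofList p.2).foldl (fun d a => d.insert a (d.getD a [] ++ [p.1])) d) d).getD atom []
      = d.getD atom [] ++ (l.filter (fun p => decide (atom ∈ p.2))).map Prod.fst := by
  induction l generalizing d with
  | nil => simp
  | cons p rest ih =>
    simp only [List.foldl_cons, List.filter_cons]
    rw [ih, pvIdx_inner _ (PySem.Set.nodup_ofList p.2)]
    by_cases h : atom ∈ p.2 <;>
      simp [h, PySem.Set.mem_ofList, List.append_assoc]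

theorem pvIdx_getD (fragments_r : List (List (Int × Int))) (atom : Int × Int) :
    ((PySem.List.enumerate fragments_r).foldl (fun d p =>
        (PySem.Set.ofList p.2).foldl (fun d a => d.insert a (d.getD a [] ++ [p.1])) d)
        PySem.Dict.empty).getD atom [] = pvIdx fragments_r atom := by
  rw [pvIdx_spec]
  simp [pvIdx]

theorem pvIdx_mem (fragments_r : List (List (Int × Int))) (atom : Int × Int) (i : Int) :
    i ∈ pvIdx fragments_r atom ↔ ∃ j : Nat, ∃ h : j < fragments_r.length, i = (j : Int) ∧ atom ∈ fragments_r[j] := by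
  simp only [pvIdx, List.mem_map, List.mem_filter, PySem.List.mem_enumerate_iff]
  constructor
  · rintro ⟨p, ⟨⟨j, hj, rfl⟩, hm⟩, rfl⟩
    exact ⟨j, hj, by simp, by simpa using hm⟩
  · rintro ⟨j, hj, rfl, hm⟩
    exact ⟨((j : Int), fragments_r[j]), ⟨⟨j, hj, by simp⟩, by simpa using hm⟩, rfl⟩

theorem pvIdx_nodup (fragments_r : List (List (Int × Int))) (atom : Int × Int) :
    (pvIdx fragments_r atom).Nodup := by
  have h := PySem.List.pairwise_lt_enumerate fragments_r (0 : Int)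
  have h2 := h.filter (fun p => decide (atom ∈ p.2))
  have h3 : ((PySem.List.enumerate fragments_r).filter (fun p => decide (atom ∈ p.2))).Pairwise
      (fun p q => Prod.fst p < Prod.fst q) := h2
  have h4 : ((((PySem.List.enumerate fragments_r).filter (fun p => decide (atom ∈ p.2))).map Prod.fst)).Pairwise (· < ·) :=
    (List.pairwise_map).mpr h3
  exact h4.nodup

theorem pvIdx_count (fragments_r : List (List (Int × Int))) (atom : Int × Int)
    (j : Nat) (hj : j < fragments_r.length) :
    (pvIdx fragments_r atom).count (j : Int) = (if atom ∈ fragments_r[j] then 1 else 0) := by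
  by_cases hm : atom ∈ fragments_r[j]
  · rw [if_pos hm]
    exact List.count_eq_one_of_mem (pvIdx_nodup _ _) ((pvIdx_mem _ _ _).mpr ⟨j, hj, rfl, hm⟩)
  · rw [if_neg hm, List.count_eq_zero]
    intro hmem
    rcases (pvIdx_mem _ _ _).mp hmem with ⟨j', hj', hje, hm'⟩
    have : j' = j := by exact_mod_cast hje.symm
    subst this
    exact hm hm'

-- the nested counting fold is the counter of the flattened index-list
theorem pvFoldl_flat {α β γ : Type} (l : List α) (g : α → List β) (f : γ → β → γ) (c : γ) :
    l.foldl (fun c a => (g a).foldl f c) c = (l.flatMap g).foldl f c := by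
  induction l generalizing c with
  | nil => simp
  | cons a rest ih => simp [List.flatMap_cons, List.foldl_append, ih]

theorem pvCount_flat {α β : Type} [DecidableEq β] (l : List α) (g : α → List β) (i : β) :
    ((l.flatMap g).count i) = (l.map (fun a => (g a).count i)).sum := by
  induction l with
  | nil => simp
  | cons a rest ih => simp [List.flatMap_cons, List.count_append, ih]

-- intersection cardinality is symmetric for duplicate-free lists
theorem pvInter_len_comm (s t : List (Int × Int)) (hs : s.Nodup) (ht : t.Nodup) :
    (PySem.Set.inter s t).length = (PySem.Set.inter t s).length := by
  have hperm : (PySem.Set.inter s t).Perm (PySem.Set.inter t s) := by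
    apply (List.perm_ext_iff_of_nodup (PySem.Set.nodup_inter s t hs) (PySem.Set.nodup_inter t s ht)).mpr
    intro x
    rw [PySem.Set.mem_inter, PySem.Set.mem_inter]
    tauto
  exact hperm.length_eq

-- |set(frag) ∩ set(rf)| as a countP over set(frag)
theorem pvInter_len_countP (frag rf : List (Int × Int)) :
    (PySem.Set.inter (PySem.Set.ofList frag) (PySem.Set.ofList rf)).length
      = (PySem.Set.ofList frag).countP (fun a => decide (a ∈ rf)) := by
  simp only [PySem.Set.inter, ← List.countP_eq_length_filter]
  apply List.countP_congr
  intro a _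
  simp [PySem.Set.mem_ofList]

theorem pvSum_ite (l : List (Int × Int)) (p : Int × Int → Prop) [DecidablePred p] :
    (l.map (fun a => if p a then 1 else 0)).sum = l.countP (fun a => decide (p a)) := by
  induction l with
  | nil => simp
  | cons a rest ih =>
    by_cases h : p a
    · simp [h, ih]; omega
    · simp [h, ih]

-- B's per-product-fragment counter is the counter of the flattened index lists
theorem pvCounts_eq (fr : List (List (Int × Int))) (frag : List (Int × Int)) :
    ((PySem.Set.ofList frag).foldl (fun c atom =>
        ((((PySem.List.enumerate fr).foldl (fun d p =>
            (PySem.Set.ofList p.2).foldl (fun d atom => d.insert atom (d.getD atom [] ++ [p.1])) d)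
            PySem.Dict.empty)).getD atom []).foldl
          (fun c i => c.insert i (c.getD i 0 + 1)) c) PySem.Dict.empty)
      = PySem.Dict.counter ((PySem.Set.ofList frag).flatMap (pvIdx fr)) := by
  rw [pvFoldl_flat, PySem.Dict.foldl_insert_getD_add_one_eq_counter]
  simp only [pvIdx_getD]

theorem pvFlat_count (fr : List (List (Int × Int))) (frag : List (Int × Int))
    (j : Nat) (hj : j < fr.length) :
    (((PySem.Set.ofList frag).flatMap (pvIdx fr)).count ((j : Nat) : Int))
      = (PySem.Set.inter (PySem.Set.ofList frag) (PySem.Set.ofList fr[j])).length := by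
  rw [pvCount_flat, pvInter_len_countP, ← pvSum_ite]
  apply congrArg List.sum
  apply List.map_congr_left
  intro a _
  exact pvIdx_count fr a j hj

theorem pvValues_counter_any (xs : List Int) (p : Int → Bool) :
    ((PySem.Dict.counter xs).values.any p = true) ↔ ∃ i ∈ xs, p ((xs.count i : Int)) := by
  rw [PySem.Dict.values, PySem.Dict.items_counter]
  simp [List.any_eq_true, PySem.Set.mem_ofList]

-- A as an existential statement
theorem pvA_iff (fr fp : List (List (Int × Int))) (k : Int) :
    have_common_fragments fr fp k = true ↔
      ∃ rf ∈ fr, ∃ pf ∈ fp,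
        k ≤ ((PySem.Set.inter (PySem.Set.ofList rf) (PySem.Set.ofList pf)).length : Int) := by
  simp only [have_common_fragments, List.any_eq_true, List.mem_map, PySem.Set.len]
  constructor
  · rintro ⟨r, ⟨rf, hrf, rfl⟩, p, ⟨pf, hpf, rfl⟩, h⟩
    split_ifs at h with hc
    exact ⟨rf, hrf, pf, hpf, hc⟩
  · rintro ⟨rf, hrf, pf, hpf, h⟩
    refine ⟨_, ⟨rf, hrf, rfl⟩, _, ⟨pf, hpf, rfl⟩, ?_⟩
    rw [if_pos h]
    simpa using h

-- B's inner test as an existential statement (for 0 < k)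
theorem pvB_inner_iff (fr : List (List (Int × Int))) (frag : List (Int × Int)) (k : Int)
    (hk : 0 < k) :
    ((PySem.Dict.counter ((PySem.Set.ofList frag).flatMap (pvIdx fr))).values.any
        (fun c => decide (k ≤ c)) = true) ↔
      ∃ j : Nat, ∃ hj : j < fr.length,
        k ≤ ((PySem.Set.inter (PySem.Set.ofList frag) (PySem.Set.ofList fr[j])).length : Int) := by
  rw [pvValues_counter_any]
  constructor
  · rintro ⟨i, hi, hp⟩
    rcases List.mem_flatMap.mp hi with ⟨a, _, hia⟩
    rcases (pvIdx_mem fr a i).mp hia with ⟨j, hj, rfl, _⟩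
    refine ⟨j, hj, ?_⟩
    rw [← pvFlat_count fr frag j hj]
    simpa using hp
  · rintro ⟨j, hj, hlen⟩
    have hpos : 0 < (PySem.Set.inter (PySem.Set.ofList frag) (PySem.Set.ofList fr[j])).length := by
      have h0 : (0 : Int) < ((PySem.Set.inter (PySem.Set.ofList frag) (PySem.Set.ofList fr[j])).length : Int) :=
        lt_of_lt_of_le hk hlen
      exact_mod_cast h0
    rcases List.exists_mem_of_length_pos hpos with ⟨a, ha⟩
    rcases (PySem.Set.mem_inter _ _ _).mp ha with ⟨haf, har⟩
    have hafrag : a ∈ frag := (PySem.Set.mem_ofList _ _).mp haf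
    have harj : a ∈ fr[j] := (PySem.Set.mem_ofList _ _).mp har
    refine ⟨(j : Int), List.mem_flatMap.mpr ⟨a, (PySem.Set.mem_ofList _ _).mpr hafrag,
      (pvIdx_mem fr a _).mpr ⟨j, hj, rfl, harj⟩⟩, ?_⟩
    rw [pvFlat_count fr frag j hj]
    simpa using hlen

-- ===== VERDICT (by name: the statement is the Claim_ definition above) =====
theorem have_common_fragments_spec : Claim_equal_have_common_fragments := by
  intro fr fp k _
  unfold Spec_have_common_fragments
  rw [Bool.eq_iff_iff]
  by_cases hk : k ≤ 0
  · -- every pair qualifies: both sides reduce to "both lists non-empty"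
    rw [pvA_iff]
    unfold have_common_fragments_alt
    rw [if_pos hk]
    simp only [Bool.and_eq_true, Bool.not_eq_true', List.isEmpty_eq_false_iff]
    constructor
    · rintro ⟨rf, hrf, pf, hpf, -⟩
      exact ⟨List.ne_nil_of_mem hrf, List.ne_nil_of_mem hpf⟩
    · rintro ⟨hr, hp⟩
      rcases List.exists_mem_of_ne_nil _ hr with ⟨rf, hrf⟩
      rcases List.exists_mem_of_ne_nil _ hp with ⟨pf, hpf⟩
      exact ⟨rf, hrf, pf, hpf, le_trans hk (Int.natCast_nonneg _)⟩
  · replace hk : 0 < k := by omega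
    rw [pvA_iff]
    unfold have_common_fragments_alt
    rw [if_neg (by omega)]
    simp only [List.any_eq_true]
    constructor
    · rintro ⟨rf, hrf, pf, hpf, hlen⟩
      refine ⟨pf, hpf, ?_⟩
      rw [pvCounts_eq]
      rcases List.mem_iff_getElem.mp hrf with ⟨j, hj, rfl⟩
      apply List.any_eq_true.mp ((pvB_inner_iff fr pf k hk).mpr ?_)
      refine ⟨j, hj, ?_⟩
      rw [show ((PySem.Set.inter (PySem.Set.ofList pf) (PySem.Set.ofList fr[j])).length)
            = ((PySem.Set.inter (PySem.Set.ofList fr[j]) (PySem.Set.ofList pf)).length) from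
          pvInter_len_comm _ _ (PySem.Set.nodup_ofList _) (PySem.Set.nodup_ofList _)]
      exact hlen
    · rintro ⟨pf, hpf, hany⟩
      rw [pvCounts_eq] at hany
      rcases (pvB_inner_iff fr pf k hk).mp (List.any_eq_true.mpr hany) with ⟨j, hj, hlen⟩
      refine ⟨fr[j], List.getElem_mem hj, pf, hpf, ?_⟩
      rw [show ((PySem.Set.inter (PySem.Set.ofList fr[j]) (PySem.Set.ofList pf)).length)
            = ((PySem.Set.inter (PySem.Set.ofList pf) (PySem.Set.ofList fr[j])).length) from
          pvInter_len_comm _ _ (PySem.Set.nodup_ofList _) (PySem.Set.nodup_ofList _)]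
      exact hlen
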